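-- pv_equiv track=rewrite | github.com/LanLab/ShigEiFinder | ShigeiFinder.py | sb610_present
-- ===== SOURCE A (Python) =====
-- def sb610_present(genes):
--     count10 = 0
--     count6 = 0
--     for g in genes:
--         if "SB10_wzy" == g or "SB10_wzx" == g:
--             count10 += 1
--         elif "SB6_wzy" == g or "SB6_wzx" == g:
--             count6 += 1
--     if count10 > 0 and count6 > 0:
--         return True
--     return False
-- ===== SOURCE B (Python) =====
-- GROUPS = (("SB10_wzy", "SB10_wzx"), ("SB6_wzy", "SB6_wzx"))
--
-- def sb610_present(genes):
--     return all(any(target in genes for target in group) for group in GROUPS)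
-- ===== Notes on version B (the rewrite author's own statement) =====
-- stated objective: idiomatic
-- what changed: Inverts the iteration: instead of one pass over genes with two counters and chained branches, B loops over the four fixed target gene names grouped by serotype and scans the input by membership per target (all/any over the target table).
import Mathlib
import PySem

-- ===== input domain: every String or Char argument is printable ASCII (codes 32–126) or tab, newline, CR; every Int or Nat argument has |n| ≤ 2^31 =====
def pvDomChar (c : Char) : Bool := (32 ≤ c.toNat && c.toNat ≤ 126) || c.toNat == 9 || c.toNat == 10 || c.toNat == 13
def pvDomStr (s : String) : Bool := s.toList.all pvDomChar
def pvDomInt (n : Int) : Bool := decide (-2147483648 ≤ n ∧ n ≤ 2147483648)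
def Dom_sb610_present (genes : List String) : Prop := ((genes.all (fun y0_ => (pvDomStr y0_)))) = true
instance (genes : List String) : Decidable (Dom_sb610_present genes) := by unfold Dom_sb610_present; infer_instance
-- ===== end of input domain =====

-- B inverts the iteration: it loops over the four fixed target gene names (grouped by
-- serotype) and scans the input by membership per target, instead of A's single pass
-- over the genes with two counters (idiomatic rewrite, same O(n) cost).

-- ===== PORT A =====
def sb610Loop : List String → Int × Int → Int × Int
  | [], acc => acc
  | g :: gs, (c10, c6) =>
    if "SB10_wzy" == g || "SB10_wzx" == g then sb610Loop gs (c10 + 1, c6)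
    else if "SB6_wzy" == g || "SB6_wzx" == g then sb610Loop gs (c10, c6 + 1)
    else sb610Loop gs (c10, c6)

def sb610_present (genes : List String) : Bool :=
  let counts := sb610Loop genes (0, 0)
  if counts.1 > 0 ∧ counts.2 > 0 then true else false

-- ===== PORT B =====
def sb610Groups : List (List String) := [["SB10_wzy", "SB10_wzx"], ["SB6_wzy", "SB6_wzx"]]

def sb610_present_alt (genes : List String) : Bool :=
  sb610Groups.all (fun group => group.any (fun target => genes.contains target))

-- ===== PRECONDITION & SPEC =====
def Spec_sb610_present (genes : List String) (out : Bool) : Prop := out = sb610_present_alt genes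
instance (genes : List String) (out : Bool) : Decidable (Spec_sb610_present genes out) := by unfold Spec_sb610_present; infer_instance

-- ===== CLAIM (what is proved, stated in full; the proofs are below) =====
def Claim_equal_sb610_present : Prop := ∀ (genes : List String), Dom_sb610_present genes → Spec_sb610_present genes (sb610_present genes)

-- ===== LEMMAS AND PROOFS =====

def p10 (g : String) : Bool := "SB10_wzy" == g || "SB10_wzx" == g
def p6 (g : String) : Bool := "SB6_wzy" == g || "SB6_wzx" == g

lemma sb610Loop_eq (gs : List String) : ∀ (c10 c6 : Int),
    sb610Loop gs (c10, c6) = (c10 + (gs.countP p10 : Int), c6 + ((gs.filter (fun g => !p10 g)).countP p6 : Int)) := by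
  induction gs with
  | nil => intro c10 c6; simp [sb610Loop]
  | cons g gs ih =>
    intro c10 c6
    by_cases h10 : p10 g = true
    · have h10' : ("SB10_wzy" == g || "SB10_wzx" == g) = true := h10
      simp [sb610Loop, h10', ih, h10]
      omega
    · have h10' : ("SB10_wzy" == g || "SB10_wzx" == g) = false := by
        simpa [p10] using h10
      by_cases h6 : p6 g = true
      · have h6' : ("SB6_wzy" == g || "SB6_wzx" == g) = true := h6
        simp [sb610Loop, h10', h6', ih, h10, h6]
        omega
      · have h6' : ("SB6_wzy" == g || "SB6_wzx" == g) = false := by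
          simpa [p6] using h6
        simp [sb610Loop, h10', h6', ih, h10, h6]

lemma sb610_A_iff (genes : List String) :
    sb610_present genes = true ↔ ((∃ g ∈ genes, p10 g) ∧ (∃ g ∈ genes, p6 g)) := by
  unfold sb610_present
  rw [sb610Loop_eq]
  constructor
  · intro h
    simp only [] at h
    split_ifs at h with hc
    · obtain ⟨h1, h2⟩ := hc
      have hp10 : 0 < genes.countP p10 := by exact_mod_cast by omega
      have hp6 : 0 < (genes.filter (fun g => !p10 g)).countP p6 := by exact_mod_cast by omega
      rw [List.countP_pos_iff] at hp10 hp6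
      obtain ⟨a, ha, hpa⟩ := hp10
      obtain ⟨b, hb, hpb⟩ := hp6
      exact ⟨⟨a, ha, hpa⟩, ⟨b, List.mem_of_mem_filter hb, hpb⟩⟩
  · rintro ⟨⟨a, ha, hpa⟩, ⟨b, hb, hpb⟩⟩
    have hb10 : p10 b = false := by
      simp only [p10, p6] at hpb ⊢
      rcases Bool.or_eq_true_iff.mp hpb with h | h <;>
        · have := eq_of_beq h; subst this; decide
    have h1 : 0 < genes.countP p10 := List.countP_pos_iff.mpr ⟨a, ha, hpa⟩
    have h2 : 0 < (genes.filter (fun g => !p10 g)).countP p6 :=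
      List.countP_pos_iff.mpr ⟨b, List.mem_filter.mpr ⟨hb, by simp [hb10]⟩, hpb⟩
    have h1' : (0 : Int) < (genes.countP p10 : Int) := by exact_mod_cast h1
    have h2' : (0 : Int) < ((genes.filter (fun g => !p10 g)).countP p6 : Int) := by exact_mod_cast h2
    simp only []
    rw [if_pos ⟨by omega, by omega⟩]

lemma sb610_B_iff (genes : List String) :
    sb610_present_alt genes = true ↔ ((∃ g ∈ genes, p10 g) ∧ (∃ g ∈ genes, p6 g)) := by
  unfold sb610_present_alt sb610Groups
  simp only [List.all_cons, List.all_nil, List.any_cons, List.any_nil,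
    Bool.and_eq_true, Bool.or_eq_true, Bool.and_true, List.contains_eq_mem,
    decide_eq_true_eq, Bool.or_false]
  constructor
  · rintro ⟨h10, h6⟩
    refine ⟨?_, ?_⟩
    · rcases h10 with h | h
      · exact ⟨_, h, by simp [p10]⟩
      · exact ⟨_, h, by simp [p10]⟩
    · rcases h6 with h | h
      · exact ⟨_, h, by simp [p6]⟩
      · exact ⟨_, h, by simp [p6]⟩
  · rintro ⟨⟨a, ha, hpa⟩, ⟨b, hb, hpb⟩⟩
    refine ⟨?_, ?_⟩
    · simp only [p10] at hpa
      rcases Bool.or_eq_true_iff.mp hpa with h | h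
      · exact Or.inl (by rw [← eq_of_beq h] at ha; exact ha)
      · exact Or.inr (by rw [← eq_of_beq h] at ha; exact ha)
    · simp only [p6] at hpb
      rcases Bool.or_eq_true_iff.mp hpb with h | h
      · exact Or.inl (by rw [← eq_of_beq h] at hb; exact hb)
      · exact Or.inr (by rw [← eq_of_beq h] at hb; exact hb)

-- ===== VERDICT (by name: the statement is the Claim_ definition above) =====
theorem sb610_present_spec : Claim_equal_sb610_present := by
  intro genes _
  unfold Spec_sb610_present
  rw [Bool.eq_iff_iff, sb610_A_iff, sb610_B_iff]
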